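-- pv_equiv track=rewrite | github.com/nicolelaitc/LeetCode | 909.snakes-and-ladders.py | destination
-- ===== SOURCE A (Python) =====
-- def destination(board, last, dice):
--     i, j = last[0], last[1]
--     j += dice
--     while j > len(board[0]) - 1:
--         i += 1
--         j -= len(board[0])
--
--     if i > len(board) - 1:
--         return []
--
--     if board[i][j] != -1:
--         i, j = (board[i][j] // len(board[0])), (board[i][j] % len(board[0])) - 1
--         if j == -1:
--             j = len(board[0]) - 1
--             i -= 1
--     return [i, j]
-- ===== SOURCE B (Python) =====
-- def destination(board, last, dice):
--     w = len(board[0])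
--     i, j = last[0], last[1] + dice
--     if j >= w:
--         i += j // w
--         j %= w
--     if i >= len(board):
--         return []
--     v = board[i][j]
--     if v == -1:
--         return [i, j]
--     return list(divmod(v - 1, w))
-- ===== Notes on version B (the rewrite author's own statement) =====
-- stated objective: simpler
-- what changed: Replaced A's column-wrapping while-loop with one closed-form floor divmod and replaced A's '//, % minus 1 then fix up the j == -1 underflow' snake/ladder redirection with a single divmod of (value - 1).
-- outside the precondition, e.g. on destination([[], [-1]], [1, 0], -1): A returns [1, -1], B returns [1, -1]
import Mathlib
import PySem

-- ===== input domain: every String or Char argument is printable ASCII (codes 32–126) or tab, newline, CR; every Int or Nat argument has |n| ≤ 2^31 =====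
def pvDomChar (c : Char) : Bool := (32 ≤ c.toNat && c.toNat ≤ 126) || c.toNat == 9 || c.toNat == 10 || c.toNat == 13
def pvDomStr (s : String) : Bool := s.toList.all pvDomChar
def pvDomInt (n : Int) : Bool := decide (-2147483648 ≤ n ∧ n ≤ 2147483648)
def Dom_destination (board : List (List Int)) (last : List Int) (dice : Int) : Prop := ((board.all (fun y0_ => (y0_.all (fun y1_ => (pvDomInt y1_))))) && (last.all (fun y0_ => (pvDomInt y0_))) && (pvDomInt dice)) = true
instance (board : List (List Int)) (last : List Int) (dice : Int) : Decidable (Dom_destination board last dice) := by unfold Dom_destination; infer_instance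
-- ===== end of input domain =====

-- B replaces A's column-wrapping while-loop and its post-hoc snake/ladder index adjustment
-- by single closed-form floor-divmod computations (objective: simpler; same asymptotic cost).


-- ===== PORT A =====
-- A's 'while j > len(board[0]) - 1: i += 1; j -= len(board[0])' loop. The extra
-- '0 < w' in the guard only makes the recursion total: with w ≤ 0 the Python loop
-- diverges, and such inputs are outside Pre_destination.
def pvWrapA (w i j : Int) : Int × Int :=
  if _h : w - 1 < j ∧ 0 < w then pvWrapA w (i + 1) (j - w) else (i, j)
termination_by (j - w + 1).toNat
decreasing_by omega

def destination (board : List (List Int)) (last : List Int) (dice : Int) : List Int :=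
  match PySem.List.pyGet? last 0, PySem.List.pyGet? last 1, PySem.List.pyGet? board 0 with
  | some i0, some j0, some row0 =>
    let w : Int := row0.length
    let p := pvWrapA w i0 (j0 + dice)
    if p.1 > (board.length : Int) - 1 then []
    else
      match (PySem.List.pyGet? board p.1).bind (fun row => PySem.List.pyGet? row p.2) with
      | some v =>
        if v ≠ -1 then
          let i' := PySem.Int.floordiv v w
          let j' := PySem.Int.mod v w - 1
          if j' = -1 then [i' - 1, w - 1] else [i', j']
        else [p.1, p.2]
      | none => []  -- board[i][j] raises IndexError: outside Pre_destination
  | _, _, _ => []   -- last[0]/last[1]/board[0] raises IndexError: outside Pre_destination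

-- ===== PORT B =====
def destination_alt (board : List (List Int)) (last : List Int) (dice : Int) : List Int :=
  match PySem.List.pyGet? board 0 with
  | none => []      -- board[0] raises IndexError: outside Pre_destination
  | some row0 =>
    match PySem.List.pyGet? last 0 with
    | none => []    -- last[0] raises IndexError: outside Pre_destination
    | some i0 =>
      match PySem.List.pyGet? last 1 with
      | none => []  -- last[1] raises IndexError: outside Pre_destination
      | some j1 =>
        let w : Int := row0.length
        let j2 := j1 + dice
        let i := if w ≤ j2 then i0 + PySem.Int.floordiv j2 w else i0
        let j := if w ≤ j2 then PySem.Int.mod j2 w else j2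
        if (board.length : Int) ≤ i then []
        else
          match (PySem.List.pyGet? board i).bind (fun row => PySem.List.pyGet? row j) with
          | some v =>
            if v = -1 then [i, j]
            else [PySem.Int.floordiv (v - 1) w, PySem.Int.mod (v - 1) w]
          | none => []  -- board[i][j] raises IndexError: outside Pre_destination

-- ===== PRECONDITION & SPEC =====
-- Closed-form final cell (row, column) after the dice move and wrap, used only by Pre_.
def pvFinIJ (board : List (List Int)) (last : List Int) (dice : Int) : Int × Int :=
  let w : Int := (board.headI).length
  let j2 : Int := last.getD 1 0 + dice
  if w ≤ j2 then (last.getD 0 0 + PySem.Int.floordiv j2 w, PySem.Int.mod j2 w)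
  else (last.getD 0 0, j2)

-- Pre_destination excludes the inputs where A raises IndexError (last shorter than 2,
-- empty board, final cell out of range for its possibly jagged row) or, with an empty
-- first row (width 0), diverges in the wrap loop or raises ZeroDivisionError; that
-- width-0 region also contains a few degenerate boards on which A happens to return
-- (wrap loop skipped, landed cell -1) and is excluded as a whole.
def Pre_destination (board : List (List Int)) (last : List Int) (dice : Int) : Prop :=
  2 ≤ last.length ∧ board ≠ [] ∧ board.headI ≠ [] ∧
  ((board.length : Int) ≤ (pvFinIJ board last dice).1 ∨
    ((PySem.List.pyGet? board (pvFinIJ board last dice).1).bind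
        (fun row => PySem.List.pyGet? row (pvFinIJ board last dice).2)).isSome = true)
instance (board : List (List Int)) (last : List Int) (dice : Int) : Decidable (Pre_destination board last dice) := by unfold Pre_destination; infer_instance

def pvWitness_destination : List (List Int) × List Int × Int := ([[-1, 2], [-1, -1]], [0, 0], 1)

def Spec_destination (board : List (List Int)) (last : List Int) (dice : Int) (out : List Int) : Prop := out = destination_alt board last dice
instance (board : List (List Int)) (last : List Int) (dice : Int) (out : List Int) : Decidable (Spec_destination board last dice out) := by unfold Spec_destination; infer_instance

-- ===== CLAIM (what is proved, stated in full; the proofs are below) =====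
def Claim_equal_destination : Prop := ∀ (board : List (List Int)) (last : List Int) (dice : Int), Dom_destination board last dice → Pre_destination board last dice → Spec_destination board last dice (destination board last dice)

-- ===== LEMMAS AND PROOFS =====

-- a + q*w with 0 ≤ a < w is the canonical form: quotient q, remainder a.
theorem pv_shift (w a q : Int) (hw : 0 < w) (h0 : 0 ≤ a) (h1 : a < w) :
    (a + q * w) / w = q ∧ (a + q * w) % w = a := by
  constructor
  · rw [Int.add_mul_ediv_right _ _ (ne_of_gt hw), Int.ediv_eq_zero_of_lt h0 h1, zero_add]
  · rw [Int.add_mul_emod_self_right, Int.emod_eq_of_lt h0 h1]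

-- A's wrapping loop equals B's guarded divmod.
theorem pvWrapA_eq (w i j : Int) (hw : 0 < w) :
    pvWrapA w i j =
      if w ≤ j then (i + PySem.Int.floordiv j w, PySem.Int.mod j w) else (i, j) := by
  rw [PySem.Int.floordiv_eq_ediv_of_pos hw, PySem.Int.mod_eq_emod_of_pos hw]
  fun_induction pvWrapA w i j with
  | case1 i j h ih =>
    rw [ih]
    have hj : w ≤ j := by omega
    have hr0 : 0 ≤ j % w := Int.emod_nonneg j (ne_of_gt hw)
    have hr1 : j % w < w := Int.emod_lt_of_pos j hw
    have hqr : w * (j / w) + j % w = j := Int.mul_ediv_add_emod j w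
    by_cases h2 : w ≤ j - w
    · -- j - w still ≥ w: shift the canonical form by one
      have hv : j - w = j % w + (j / w - 1) * w := by linear_combination -hqr
      obtain ⟨hd, hm⟩ := pv_shift w (j % w) (j / w - 1) hw hr0 hr1
      rw [← hv] at hd hm
      rw [if_pos h2, if_pos hj, hd, hm]
      exact Prod.ext (by omega) rfl
    · -- w ≤ j < 2w: quotient 1, remainder j - w
      have hv : j = (j - w) + 1 * w := by ring
      obtain ⟨hd, hm⟩ := pv_shift w (j - w) 1 hw (by omega) (by omega)
      rw [← hv] at hd hm
      rw [if_neg h2, if_pos hj, hd, hm]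
  | case2 i j h =>
    rw [if_neg (by omega)]

-- A's '//, % then fix up j = -1' redirection equals B's divmod of (v - 1).
theorem pv_redirect (w v : Int) (hw : 0 < w) :
    (if PySem.Int.mod v w - 1 = -1 then [PySem.Int.floordiv v w - 1, w - 1]
     else [PySem.Int.floordiv v w, PySem.Int.mod v w - 1])
    = [PySem.Int.floordiv (v - 1) w, PySem.Int.mod (v - 1) w] := by
  rw [PySem.Int.floordiv_eq_ediv_of_pos hw, PySem.Int.mod_eq_emod_of_pos hw,
      PySem.Int.floordiv_eq_ediv_of_pos hw, PySem.Int.mod_eq_emod_of_pos hw]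
  have hr0 : 0 ≤ v % w := Int.emod_nonneg v (ne_of_gt hw)
  have hr1 : v % w < w := Int.emod_lt_of_pos v hw
  have hqr : w * (v / w) + v % w = v := Int.mul_ediv_add_emod v w
  by_cases h : v % w = 0
  · have hv : v - 1 = (w - 1) + (v / w - 1) * w := by linear_combination -hqr + h
    obtain ⟨hd, hm⟩ := pv_shift w (w - 1) (v / w - 1) hw (by omega) (by omega)
    rw [← hv] at hd hm
    rw [if_pos (by omega), hd, hm]
  · have hv : v - 1 = (v % w - 1) + (v / w) * w := by linear_combination -hqr
    obtain ⟨hd, hm⟩ := pv_shift w (v % w - 1) (v / w) hw (by omega) (by omega)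
    rw [← hv] at hd hm
    rw [if_neg (by omega), hd, hm]

-- ===== VERDICT (by name: the statement is the Claim_ definition above) =====
theorem destination_spec : Claim_equal_destination := by
  intro board last dice _hdom hpre
  obtain ⟨hlen, hne, hrow0, _⟩ := hpre
  cases board with
  | nil => exact absurd rfl hne
  | cons row0 rest =>
    match last, hlen with
    | a :: b :: t, _ =>
      have hw : 0 < (row0.length : Int) := by
        cases row0 with
        | nil => exact absurd rfl hrow0
        | cons x xs => simp
      unfold Spec_destination destination destination_alt
      rw [PySem.List.pyGet?_zero_cons a (b :: t), PySem.List.pyGet?_zero_cons row0 rest,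
          show PySem.List.pyGet? (a :: b :: t) 1 = some b by
            simp [PySem.List.pyGet?, PySem.List.pyIdx?]]
      dsimp only
      rw [pvWrapA_eq _ _ _ hw]
      by_cases hj : (row0.length : Int) ≤ b + dice
      · simp only [if_pos hj]
        by_cases hi : ((row0 :: rest).length : Int) ≤ a + PySem.Int.floordiv (b + dice) row0.length
        · rw [if_pos (by omega : ((row0 :: rest).length : Int) - 1 < (a + PySem.Int.floordiv (b + dice) (row0.length : Int), PySem.Int.mod (b + dice) (row0.length : Int)).1), if_pos hi]
        · rw [if_neg (by omega), if_neg hi]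
          cases hlook : (PySem.List.pyGet? (row0 :: rest) (a + PySem.Int.floordiv (b + dice) row0.length)).bind
              (fun row => PySem.List.pyGet? row (PySem.Int.mod (b + dice) row0.length)) with
          | none => rfl
          | some v =>
            dsimp only
            by_cases hv : v = -1
            · rw [if_neg (not_not_intro hv), if_pos hv]
            · rw [if_pos hv, if_neg hv]
              exact pv_redirect row0.length v hw
      · simp only [if_neg hj]
        by_cases hi : ((row0 :: rest).length : Int) ≤ a
        · rw [if_pos (by omega), if_pos hi]
        · rw [if_neg (by omega), if_neg hi]
          cases hlook : (PySem.List.pyGet? (row0 :: rest) a).bind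
              (fun row => PySem.List.pyGet? row (b + dice)) with
          | none => rfl
          | some v =>
            dsimp only
            by_cases hv : v = -1
            · rw [if_neg (not_not_intro hv), if_pos hv]
            · rw [if_pos hv, if_neg hv]
              exact pv_redirect row0.length v hw
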